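-- pv_equiv track=rewrite | github.com/EgorKonstrukt/UniversalPhysicsSimulationToolkit | UPST/modules/graph_manager.py | _apply_line_style
-- ===== SOURCE A (Python) =====
-- def _apply_line_style(points, style):
--     if style=='solid' or len(points)<2: return [points]
--     step = 4 if style=='dotted' else 8
--     segments,current = [],[]
--     for i,p in enumerate(points):
--         current.append(p)
--         if i%step==step-1:
--             segments.append(current)
--             current = []
--     if current: segments.append(current)
--     return segments
-- ===== SOURCE B (Python) =====
-- def _apply_line_style(points, style):
--     if style == 'solid' or len(points) < 2:
--         return [points]
--     step = 4 if style == 'dotted' else 8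
--     return [points[i:i+step] for i in range(0, len(points), step)]
-- ===== Notes on version B (the rewrite author's own statement) =====
-- stated objective: simpler
-- what changed: Replaces the per-element loop with a modulo counter and running 'current' accumulator by direct index slicing: segments are carved out as points[i:i+step] for i in range(0, len(points), step), eliminating all mutable accumulator state.
import Mathlib
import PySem

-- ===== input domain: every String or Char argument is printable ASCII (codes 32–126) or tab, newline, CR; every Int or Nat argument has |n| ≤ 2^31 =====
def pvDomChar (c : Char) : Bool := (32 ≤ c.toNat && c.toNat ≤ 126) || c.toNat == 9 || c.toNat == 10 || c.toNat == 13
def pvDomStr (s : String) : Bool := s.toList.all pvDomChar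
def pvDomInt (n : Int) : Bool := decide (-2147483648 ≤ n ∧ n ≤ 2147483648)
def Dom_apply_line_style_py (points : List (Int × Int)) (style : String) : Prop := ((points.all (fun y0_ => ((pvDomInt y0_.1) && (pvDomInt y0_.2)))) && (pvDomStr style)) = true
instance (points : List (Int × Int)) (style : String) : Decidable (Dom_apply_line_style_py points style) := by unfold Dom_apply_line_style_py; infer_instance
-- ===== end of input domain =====

-- B replaces A's modulo-counter/accumulator loop by direct index slicing (simpler, same cost).

-- ===== PORT A =====
-- literal transliteration of A: fold over enumerate(points) carrying (segments, current),
-- flushing current when i % step == step - 1, plus the final 'if current' flush.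
def apply_line_style_py (points : List (Int × Int)) (style : String) : List (List (Int × Int)) :=
  if style = "solid" ∨ points.length < 2 then [points]
  else
    let step : Int := if style = "dotted" then 4 else 8
    let st := (PySem.List.enumerate points 0).foldl
      (fun (st : List (List (Int × Int)) × List (Int × Int)) ip =>
        let current := st.2 ++ [ip.2]
        if PySem.Int.mod ip.1 step = step - 1 then (st.1 ++ [current], []) else (st.1, current))
      ([], [])
    if st.2 ≠ [] then st.1 ++ [st.2] else st.1

-- ===== PORT B =====
-- literal transliteration of B: [points[i:i+step] for i in range(0, len(points), step)]
def apply_line_style_py_alt (points : List (Int × Int)) (style : String) : List (List (Int × Int)) :=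
  if style = "solid" ∨ points.length < 2 then [points]
  else
    let step : Int := if style = "dotted" then 4 else 8
    (PySem.List.pyRange 0 points.length step).map
      (fun i => PySem.List.slice points (some i) (some (i + step)))

-- ===== PRECONDITION & SPEC =====
def Spec_apply_line_style_py (points : List (Int × Int)) (style : String) (out : List (List (Int × Int))) : Prop := out = apply_line_style_py_alt points style
instance (points : List (Int × Int)) (style : String) (out : List (List (Int × Int))) : Decidable (Spec_apply_line_style_py points style out) := by unfold Spec_apply_line_style_py; infer_instance

-- ===== CLAIM (what is proved, stated in full; the proofs are below) =====
def Claim_equal_apply_line_style_py : Prop := ∀ (points : List (Int × Int)) (style : String), Dom_apply_line_style_py points style → Spec_apply_line_style_py points style (apply_line_style_py points style)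

-- ===== LEMMAS AND PROOFS =====

-- A's loop body and the final flush, named for the proofs
def pvStep (s : Int) (st : List (List (Int × Int)) × List (Int × Int)) (ip : Int × (Int × Int)) :
    List (List (Int × Int)) × List (Int × Int) :=
  let current := st.2 ++ [ip.2]
  if PySem.Int.mod ip.1 s = s - 1 then (st.1 ++ [current], []) else (st.1, current)

def pvFlush (st : List (List (Int × Int)) × List (Int × Int)) : List (List (Int × Int)) :=
  if st.2 ≠ [] then st.1 ++ [st.2] else st.1

-- the common normal form both ports are reduced to: chunks of size s (intended for 1 ≤ s)
def pvChunks (s : Nat) : List (Int × Int) → List (List (Int × Int))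
  | [] => []
  | p :: t => ((p :: t).take s) :: pvChunks s (t.drop (s - 1))
termination_by l => l.length
decreasing_by simp

theorem pvChunks_nil (s : Nat) : pvChunks s [] = [] := by rw [pvChunks.eq_def]

theorem pvChunks_cons (s : Nat) (p : Int × Int) (t : List (Int × Int)) :
    pvChunks s (p :: t) = ((p :: t).take s) :: pvChunks s (t.drop (s - 1)) := by rw [pvChunks.eq_def]

-- A's loop state folded into the final value: cur is the partially filled chunk,
-- c = i % s is how many slots of the current chunk are already used.
def pvGlue (s c : Nat) (cur : List (Int × Int)) (l : List (Int × Int)) : List (List (Int × Int)) :=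
  match l with
  | [] => if cur = [] then [] else [cur]
  | _ :: _ => (cur ++ l.take (s - c)) :: pvChunks s (l.drop (s - c))

theorem pvGlue_zero (s : Nat) (hs : 1 ≤ s) (l : List (Int × Int)) :
    pvGlue s 0 [] l = pvChunks s l := by
  cases l with
  | nil => simp [pvGlue, pvChunks_nil]
  | cons p t =>
    have hdrop : (p :: t).drop s = t.drop (s - 1) := by
      cases s with
      | zero => omega
      | succ s' => simp [List.drop_succ_cons]
    rw [pvChunks_cons]
    simp [pvGlue, hdrop]

theorem pvGlue_flush (s : Nat) (hs : 1 ≤ s) (cur : List (Int × Int)) (p : Int × Int)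
    (t : List (Int × Int)) : pvGlue s (s - 1) cur (p :: t) = (cur ++ [p]) :: pvChunks s t := by
  have h1 : s - (s - 1) = 1 := by omega
  simp only [pvGlue, h1]
  simp

theorem pvGlue_acc (s c : Nat) (hc : c + 1 < s) (cur : List (Int × Int)) (p : Int × Int)
    (t : List (Int × Int)) : pvGlue s c cur (p :: t) = pvGlue s (c + 1) (cur ++ [p]) t := by
  have h1 : s - c = (s - (c + 1)) + 1 := by omega
  cases t with
  | nil =>
    simp only [pvGlue, h1, List.take_succ_cons, List.drop_succ_cons]
    simp [pvChunks_nil]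
  | cons q u =>
    simp only [pvGlue, h1, List.take_succ_cons, List.drop_succ_cons]
    simp

theorem pvMod_cast (i s : Nat) : PySem.Int.mod (i : Int) (s : Int) = ((i % s : Nat) : Int) := by
  unfold PySem.Int.mod
  rw [Int.fmod_eq_emod]
  rw [if_pos (Or.inl (by positivity : (0 : Int) ≤ (s : Int))), add_zero]
  exact (Int.natCast_mod i s).symm

theorem pvA_loop (s : Nat) (hs : 1 ≤ s) :
    ∀ (l : List (Int × Int)) (i : Nat) (segs : List (List (Int × Int))) (cur : List (Int × Int)),
    pvFlush (((PySem.List.enumerate l (i : Int)).foldl (pvStep (s : Int)) (segs, cur)))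
      = segs ++ pvGlue s (i % s) cur l := by
  intro l
  induction l with
  | nil =>
    intro i segs cur
    rw [PySem.List.enumerate_nil, List.foldl_nil]
    unfold pvFlush pvGlue
    by_cases h : cur = [] <;> simp [h]
  | cons p t IH =>
    intro i segs cur
    rw [PySem.List.enumerate_cons, List.foldl_cons]
    have hcast : ((i : Int) + 1) = ((i + 1 : Nat) : Int) := by push_cast; ring
    by_cases hc : i % s = s - 1
    · have hstep : pvStep (s : Int) (segs, cur) ((i : Int), p) = (segs ++ [cur ++ [p]], []) := by
        unfold pvStep
        rw [if_pos]
        rw [pvMod_cast, hc]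
        omega
      rw [hstep, hcast, IH (i + 1) (segs ++ [cur ++ [p]]) []]
      have h2 : (i + 1) % s = 0 := by
        rcases Nat.lt_or_ge 1 s with h | h
        · rw [Nat.add_mod, Nat.mod_eq_of_lt h, hc, Nat.sub_add_cancel hs, Nat.mod_self]
        · have hs1 : s = 1 := by omega
          simp [hs1, Nat.mod_one]
      rw [h2, pvGlue_zero s hs, hc, pvGlue_flush s hs]
      simp
    · have hlt : i % s < s - 1 := by
        have := Nat.mod_lt i (show 0 < s by omega)
        omega
      have hstep : pvStep (s : Int) (segs, cur) ((i : Int), p) = (segs, cur ++ [p]) := by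
        unfold pvStep
        rw [if_neg]
        rw [pvMod_cast]
        omega
      rw [hstep, hcast, IH (i + 1) segs (cur ++ [p])]
      have h2 : (i + 1) % s = i % s + 1 := by
        have hs2 : 1 < s := by omega
        rw [Nat.add_mod, Nat.mod_eq_of_lt hs2, Nat.mod_eq_of_lt (by omega : i % s + 1 < s)]
      rw [h2, pvGlue_acc s (i % s) (by omega) cur p t]

-- B's slice comprehension computes pvChunks: first a pure Nat statement by fuel induction
theorem pvB_nat (s : Nat) (hs : 1 ≤ s) :
    ∀ (n : Nat) (l : List (Int × Int)) (m : Nat), l.length ≤ n → m = (l.length + s - 1) / s →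
    (List.range m).map (fun k => (l.drop (s * k)).take s) = pvChunks s l := by
  intro n
  induction n with
  | zero =>
    intro l m hl hm
    have hnil : l = [] := List.length_eq_zero_iff.mp (by omega)
    subst hnil
    have : m = 0 := by
      rw [hm]
      exact Nat.div_eq_of_lt (by simp; omega)
    simp [this, pvChunks_nil]
  | succ n IH =>
    intro l m hl hm
    cases l with
    | nil =>
      have : m = 0 := by
        rw [hm]
        exact Nat.div_eq_of_lt (by simp; omega)
      simp [this, pvChunks_nil]
    | cons p t =>
      have hn : (p :: t).length = t.length + 1 := by simp
      have hm1 : 1 ≤ m := by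
        rw [hm, hn, Nat.le_div_iff_mul_le (by omega)]
        omega
      obtain ⟨m', rfl⟩ : ∃ m', m = m' + 1 := ⟨m - 1, by omega⟩
      rw [List.range_succ_eq_map, List.map_cons, List.map_map]
      have h0 : ((p :: t).drop (s * 0)).take s = (p :: t).take s := by simp
      rw [h0, pvChunks_cons]
      congr 1
      have hfun : ((fun k => ((p :: t).drop (s * k)).take s) ∘ Nat.succ)
           = (fun k => ((t.drop (s - 1)).drop (s * k)).take s) := by
        funext k
        simp only [Function.comp]
        rw [List.drop_drop]
        have harg : s * (k + 1) = (s * k + (s - 1)) + 1 := by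
          cases s with
          | zero => omega
          | succ s' => ring_nf; omega
        rw [show Nat.succ k = k + 1 from rfl, harg, List.drop_succ_cons]
        rw [Nat.add_comm (s * k) (s - 1), ← List.drop_drop]
      rw [hfun]
      apply IH
      · simp
        omega
      · have hlen : (t.drop (s - 1)).length = t.length - (s - 1) := by simp
        rw [hlen]
        have hm2 : m' + 1 = (t.length + 1 + s - 1) / s := by rw [hm, hn]
        by_cases hts : t.length + 1 ≤ s
        · have h1 : (t.length + 1 + s - 1) / s = 1 :=
            Nat.div_eq_of_lt_le (by omega) (by omega)
          have h2 : (t.length - (s - 1) + s - 1) / s = 0 := Nat.div_eq_of_lt (by omega)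
          omega
        · have h1 : t.length + 1 + s - 1 = t.length + s := by omega
          have h2 : t.length - (s - 1) + s - 1 = t.length := by omega
          rw [h2]
          rw [h1, Nat.add_div_right _ (by omega)] at hm2
          omega

theorem pvB_chunks (s : Nat) (hs : 1 ≤ s) (l : List (Int × Int)) :
    (PySem.List.pyRange 0 l.length (s : Int)).map
      (fun i => PySem.List.slice l (some i) (some (i + (s : Int)))) = pvChunks s l := by
  rw [PySem.List.pyRange_of_pos _ _ (by exact_mod_cast hs)]
  by_cases hl : l.length = 0
  · rw [if_neg (by omega : ¬ ((0 : Int) < (l.length : Int)))]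
    rw [List.length_eq_zero_iff.mp hl]
    simp [pvChunks_nil]
  · rw [if_pos (by exact_mod_cast Nat.pos_of_ne_zero hl)]
    have hcount : (((l.length : Int) - 0 + (s : Int) - 1) / (s : Int)).toNat = (l.length + s - 1) / s := by
      have h1 : ((l.length : Int) - 0 + (s : Int) - 1) = ((l.length + s - 1 : Nat) : Int) := by
        omega
      rw [h1, ← Int.natCast_div, Int.toNat_natCast]
    rw [hcount, List.map_map, ← pvB_nat s hs l.length l _ le_rfl rfl]
    apply List.map_congr_left
    intro k _
    simp only [Function.comp]
    rw [zero_add]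
    rw [show ((s : Int) * (k : Int)) = ((s * k : Nat) : Int) by push_cast; ring]
    rw [PySem.List.slice_natCast_add]

-- one non-trivial branch, for a fixed chunk size s: A's fold = B's slice map
theorem pvBranch (points : List (Int × Int)) (s : Nat) (hs : 1 ≤ s) :
    pvFlush ((PySem.List.enumerate points 0).foldl (pvStep (s : Int)) ([], []))
      = (PySem.List.pyRange 0 points.length (s : Int)).map
          (fun i => PySem.List.slice points (some i) (some (i + (s : Int)))) := by
  rw [pvB_chunks s hs points]
  have := pvA_loop s hs points 0 [] []
  rw [show ((0 : Nat) : Int) = (0 : Int) by rfl] at this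
  rw [this, Nat.zero_mod, pvGlue_zero s hs]
  simp

-- ===== VERDICT (by name: the statement is the Claim_ definition above) =====
theorem apply_line_style_py_spec : Claim_equal_apply_line_style_py := by
  intro points style _
  unfold Spec_apply_line_style_py apply_line_style_py apply_line_style_py_alt
  by_cases hg : style = "solid" ∨ points.length < 2
  · rw [if_pos hg, if_pos hg]
  · rw [if_neg hg, if_neg hg]
    by_cases hd : style = "dotted"
    · subst hd
      simp only [reduceIte]
      exact pvBranch points 4 (by omega)
    · simp only [if_neg hd]
      exact pvBranch points 8 (by omega)
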